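-- pv_equiv track=rewrite | github.com/pranamyajainn/HireAI | utils/ai_matcher.py | _location_match
-- ===== SOURCE A (Python) =====
-- def _location_match(required: str, candidate: str) -> bool:
--     """Check if locations match"""
--     location_groups = {
--         'europe': ['london', 'berlin', 'amsterdam', 'paris', 'madrid', 'uk', 'germany', 'france'],
--         'usa': ['san francisco', 'new york', 'seattle', 'austin', 'boston', 'sf', 'nyc'],
--         'remote': ['remote', 'anywhere', 'distributed']
--     }
--
--     for group, locations in location_groups.items():
--         if required in locations and any(loc in candidate for loc in locations):
--             return True
--
--     return required in candidate
-- ===== SOURCE B (Python) =====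
-- def _location_match(required: str, candidate: str) -> bool:
--     """Check if locations match"""
--     location_groups = {
--         'europe': ['london', 'berlin', 'amsterdam', 'paris', 'madrid', 'uk', 'germany', 'france'],
--         'usa': ['san francisco', 'new york', 'seattle', 'austin', 'boston', 'sf', 'nyc'],
--         'remote': ['remote', 'anywhere', 'distributed']
--     }
--     # reverse index: known location -> its group label
--     group_of = {loc: group for group, locs in location_groups.items() for loc in locs}
--     # scan the candidate once: which group labels appear in it
--     groups_in_candidate = {group for loc, group in group_of.items() if loc in candidate}
--     g = group_of.get(required)
--     if g is not None and g in groups_in_candidate: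
--         return True
--     return required in candidate
-- ===== Notes on version B (the rewrite author's own statement) =====
-- stated objective: alternative
-- what changed: Reverses the traversal direction: instead of scanning the groups for one containing `required` and then testing that group's locations against the candidate with early return, B builds a reverse index location->group once, scans the candidate for the set of group labels it mentions, and answers by a single lookup of required's group in that set (with the same substring fallback).
import Mathlib
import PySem

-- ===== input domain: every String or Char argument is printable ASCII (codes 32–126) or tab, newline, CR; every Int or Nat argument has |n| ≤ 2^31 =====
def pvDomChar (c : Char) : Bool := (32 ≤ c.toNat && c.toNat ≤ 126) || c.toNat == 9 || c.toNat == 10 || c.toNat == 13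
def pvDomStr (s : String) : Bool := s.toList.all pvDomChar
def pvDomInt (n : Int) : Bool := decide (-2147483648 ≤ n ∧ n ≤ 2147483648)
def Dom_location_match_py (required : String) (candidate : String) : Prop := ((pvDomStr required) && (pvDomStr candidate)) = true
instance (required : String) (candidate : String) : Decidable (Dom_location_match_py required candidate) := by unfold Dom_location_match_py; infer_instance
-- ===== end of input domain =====

-- B reverses the traversal: a reverse index location->group plus the set of group labels found in the candidate, instead of A's per-group check-and-early-return scan; objective: alternative.


-- ===== PORT A =====
def pvGroupsA : List (String × List String) :=
  [("europe", ["london", "berlin", "amsterdam", "paris", "madrid", "uk", "germany", "france"]),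
   ("usa", ["san francisco", "new york", "seattle", "austin", "boston", "sf", "nyc"]),
   ("remote", ["remote", "anywhere", "distributed"])]

-- the 'for group, locations in …: if …: return True' loop, then 'return required in candidate'
def pvLoopA (required : String) (candidate : String) : List (String × List String) → Bool
  | [] => PySem.Str.isIn required candidate
  | (_, locs) :: rest =>
    if locs.contains required && locs.any (fun loc => PySem.Str.isIn loc candidate) then true
    else pvLoopA required candidate rest

def location_match_py (required : String) (candidate : String) : Bool :=
  pvLoopA required candidate pvGroupsA

-- ===== PORT B =====
def pvGroupsB : List (String × List String) :=
  [("europe", ["london", "berlin", "amsterdam", "paris", "madrid", "uk", "germany", "france"]),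
   ("usa", ["san francisco", "new york", "seattle", "austin", "boston", "sf", "nyc"]),
   ("remote", ["remote", "anywhere", "distributed"])]

-- group_of = {loc: group for group, locs in location_groups.items() for loc in locs}
def pvGroupOfB : PySem.Dict String String :=
  pvGroupsB.foldl (fun d g => g.2.foldl (fun d loc => d.insert loc g.1) d) PySem.Dict.empty

-- groups_in_candidate = {group for loc, group in group_of.items() if loc in candidate}
def pvGroupsInCand (candidate : String) : PySem.Set String :=
  pvGroupOfB.items.foldl
    (fun s p => if PySem.Str.isIn p.1 candidate then PySem.Set.add s p.2 else s)
    PySem.Set.empty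

def location_match_py_alt (required : String) (candidate : String) : Bool :=
  match pvGroupOfB.get? required with
  | some g =>
      if PySem.Set.contains (pvGroupsInCand candidate) g then true
      else PySem.Str.isIn required candidate
  | none => PySem.Str.isIn required candidate

-- ===== PRECONDITION & SPEC =====
def Spec_location_match_py (required : String) (candidate : String) (out : Bool) : Prop := out = location_match_py_alt required candidate
instance (required : String) (candidate : String) (out : Bool) : Decidable (Spec_location_match_py required candidate out) := by unfold Spec_location_match_py; infer_instance

-- ===== CLAIM (what is proved, stated in full; the proofs are below) =====
def Claim_equal_location_match_py : Prop := ∀ (required : String) (candidate : String), Dom_location_match_py required candidate → Spec_location_match_py required candidate (location_match_py required candidate)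

-- ===== LEMMAS AND PROOFS =====

-- pvGroupOfB evaluated to its literal association list (used to unblock simp in the main proof)
theorem pvGroupOfB_eq : pvGroupOfB = PySem.Dict.mk
    [("london", "europe"), ("berlin", "europe"), ("amsterdam", "europe"), ("paris", "europe"),
     ("madrid", "europe"), ("uk", "europe"), ("germany", "europe"), ("france", "europe"),
     ("san francisco", "usa"), ("new york", "usa"), ("seattle", "usa"), ("austin", "usa"),
     ("boston", "usa"), ("sf", "usa"), ("nyc", "usa"),
     ("remote", "remote"), ("anywhere", "remote"), ("distributed", "remote")] := by decide

theorem pv_contains_add (s : PySem.Set String) (y x : String) :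
    (PySem.Set.add s y).contains x = (s.contains x || x == y) := by
  by_cases hxy : x = y
  · subst hxy
    simp only [PySem.Set.add]
    split_ifs with h <;> simp_all
  · simp only [PySem.Set.add]
    split_ifs with h <;> simp [hxy]

theorem pv_contains_fold (cand : String) (items : List (String × String))
    (s : PySem.Set String) (x : String) :
    (items.foldl (fun s p => if PySem.Str.isIn p.1 cand then PySem.Set.add s p.2 else s) s).contains x
      = (s.contains x || items.any (fun p => x == p.2 && PySem.Str.isIn p.1 cand)) := by
  induction items generalizing s with
  | nil => simp
  | cons p rest ih =>
      simp only [List.foldl_cons, List.any_cons]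
      by_cases h : PySem.Str.isIn p.1 cand = true
      · rw [if_pos h, ih, pv_contains_add, h]
        simp [Bool.or_assoc]
      · rw [if_neg h, ih]
        rw [Bool.not_eq_true] at h
        rw [h]
        simp

-- location_match_py_alt, with the set membership rewritten as a single any-pass over the index items
theorem pv_alt_eq (required candidate : String) :
    location_match_py_alt required candidate =
      (match pvGroupOfB.get? required with
       | some g =>
           (pvGroupOfB.items.any (fun p => g == p.2 && PySem.Str.isIn p.1 candidate)
             || PySem.Str.isIn required candidate)
       | none => PySem.Str.isIn required candidate) := by
  unfold location_match_py_alt pvGroupsInCand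
  cases h : pvGroupOfB.get? required with
  | none => rfl
  | some g =>
      simp only [pv_contains_fold]
      simp

-- ===== VERDICT (by name: the statement is the Claim_ definition above) =====
set_option maxHeartbeats 2000000 in
theorem location_match_py_spec : Claim_equal_location_match_py := by
  intro required candidate _
  unfold Spec_location_match_py location_match_py
  rw [pv_alt_eq]
  by_cases h1 : required ∈ ["london", "berlin", "amsterdam", "paris", "madrid", "uk", "germany", "france"]
  · fin_cases h1 <;>
      simp [pv_alt_eq, pvLoopA, pvGroupsA, pvGroupOfB_eq, PySem.Dict.items,
        PySem.Dict.get?_mk_cons, Bool.or_assoc]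
  by_cases h2 : required ∈ ["san francisco", "new york", "seattle", "austin", "boston", "sf", "nyc"]
  · fin_cases h2 <;>
      simp [pv_alt_eq, pvLoopA, pvGroupsA, pvGroupOfB_eq, PySem.Dict.items,
        PySem.Dict.get?_mk_cons, Bool.or_assoc]
  by_cases h3 : required ∈ ["remote", "anywhere", "distributed"]
  · fin_cases h3 <;>
      simp [pv_alt_eq, pvLoopA, pvGroupsA, pvGroupOfB_eq, PySem.Dict.items,
        PySem.Dict.get?_mk_cons, Bool.or_assoc]
  · simp only [List.mem_cons, List.not_mem_nil, or_false] at h1 h2 h3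
    push_neg at h1 h2 h3
    obtain ⟨n1, n2, n3, n4, n5, n6, n7, n8⟩ := h1
    obtain ⟨m1, m2, m3, m4, m5, m6, m7⟩ := h2
    obtain ⟨r1, r2, r3⟩ := h3
    simp [pvLoopA, pvGroupsA, pvGroupOfB_eq, PySem.Dict.get?,
      n1, n2, n3, n4, n5, n6, n7, n8, m1, m2, m3, m4, m5, m6, m7, r1, r2, r3,
      Ne.symm n1, Ne.symm n2, Ne.symm n3, Ne.symm n4, Ne.symm n5, Ne.symm n6, Ne.symm n7, Ne.symm n8,
      Ne.symm m1, Ne.symm m2, Ne.symm m3, Ne.symm m4, Ne.symm m5, Ne.symm m6, Ne.symm m7,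
      Ne.symm r1, Ne.symm r2, Ne.symm r3]
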